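-- pv_equiv track=rewrite | github.com/jeffkimbrel/jak-bio | fasta_translate.py | fix_ambiguous_aa
-- ===== SOURCE A (Python) =====
-- def fix_ambiguous_aa(seq, add_stop):
--
--     '''
--     The pyrrolysine and selenocysteine can be changed at the codon table step in the main code,
--     but other IUPAC ambiguous characters need to just be changed to one of the
--     '''
--
--     replacements = {
--         "X": "O",
--         "B": 'D', # Aspartic acid or Asparagine
--         "Z": 'E'  # Glutamic acid or Glutamine
--     }
--
--     seq = str(seq).upper() + "*"
--
--     for aa, codon in replacements.items():
--         seq = seq.replace(aa, codon)
--
--     return(seq)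
-- ===== SOURCE B (Python) =====
-- def fix_ambiguous_aa(seq, add_stop):
--     '''
--     The pyrrolysine and selenocysteine can be changed at the codon table step in the main code,
--     but other IUPAC ambiguous characters need to just be changed to one of the
--     '''
--     # single pass: explicit per-character branching, stop codon appended at the end
--     out = []
--     for c in str(seq).upper():
--         if c == 'X':
--             out.append('O')
--         elif c == 'B':
--             out.append('D')
--         elif c == 'Z':
--             out.append('E')
--         else:
--             out.append(c)
--     out.append('*')
--     return ''.join(out)
-- ===== Notes on version B (the rewrite author's own statement) =====
-- stated objective: idiomatic
-- what changed: Instead of looping over three replacement rules and rescanning the whole string with str.replace for each, B makes one explicit pass over the uppercased characters with an if/elif chain (no dict at all), accumulating the output list and appending the stop '*' at the end.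
import Mathlib
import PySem

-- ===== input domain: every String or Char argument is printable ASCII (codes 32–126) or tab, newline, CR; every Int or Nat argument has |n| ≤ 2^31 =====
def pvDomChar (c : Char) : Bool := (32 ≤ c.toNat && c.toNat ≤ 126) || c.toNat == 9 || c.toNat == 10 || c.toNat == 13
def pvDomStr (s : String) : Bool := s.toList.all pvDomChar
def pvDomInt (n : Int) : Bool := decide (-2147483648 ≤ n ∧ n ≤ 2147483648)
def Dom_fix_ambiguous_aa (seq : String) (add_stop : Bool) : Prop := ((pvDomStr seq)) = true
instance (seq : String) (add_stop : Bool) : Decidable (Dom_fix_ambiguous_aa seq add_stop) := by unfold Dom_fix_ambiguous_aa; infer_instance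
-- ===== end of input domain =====

-- B replaces A's three whole-string replace passes (one dict rule per pass) with a single
-- explicit pass over the uppercased characters using an if/elif chain (no dict), appending
-- the stop '*' at the end (objective: idiomatic). `add_stop` is unused by A and hence by B.

-- ===== PORT A =====
def fix_ambiguous_aa (seq : String) (add_stop : Bool) : String :=
  let replacements : PySem.Dict String String :=
    ((PySem.Dict.empty.insert "X" "O").insert "B" "D").insert "Z" "E"
  let seq1 := PySem.Str.upper seq ++ "*"
  replacements.items.foldl (fun s p => PySem.Str.replace s p.1 p.2) seq1

-- ===== PORT B =====
def fix_ambiguous_aa_alt (seq : String) (add_stop : Bool) : String :=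
  let out : List Char :=
    (PySem.Str.upper seq).toList.foldl
      (fun acc c =>
        if c = 'X' then acc ++ ['O']
        else if c = 'B' then acc ++ ['D']
        else if c = 'Z' then acc ++ ['E']
        else acc ++ [c]) []
  String.ofList (out ++ ['*'])

-- ===== PRECONDITION & SPEC =====
def Spec_fix_ambiguous_aa (seq : String) (add_stop : Bool) (out : String) : Prop := out = fix_ambiguous_aa_alt seq add_stop
instance (seq : String) (add_stop : Bool) (out : String) : Decidable (Spec_fix_ambiguous_aa seq add_stop out) := by unfold Spec_fix_ambiguous_aa; infer_instance

-- ===== CLAIM (what is proved, stated in full; the proofs are below) =====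
def Claim_equal_fix_ambiguous_aa : Prop := ∀ (seq : String) (add_stop : Bool), Dom_fix_ambiguous_aa seq add_stop → Spec_fix_ambiguous_aa seq add_stop (fix_ambiguous_aa seq add_stop)

-- ===== LEMMAS AND PROOFS =====

-- replacing a single character a by b is a character map
theorem replace_go_single (a b : Char) :
    ∀ (l : List Char) (fuel : Nat) (acc : List Char), l.length ≤ fuel →
      PySem.Chars.replace.go [a] [b] fuel l acc =
        acc.reverse ++ l.map (fun c => if c = a then b else c) := by
  intro l
  induction l with
  | nil =>
    intro fuel acc _
    cases fuel <;> simp [PySem.Chars.replace.go]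
  | cons c t ih =>
    intro fuel acc h
    cases fuel with
    | zero => simp at h
    | succ m =>
      have ht : t.length ≤ m := by simpa using h
      by_cases hc : c = a
      · subst hc
        simp [PySem.Chars.replace.go, List.isPrefixOf, ih m _ ht]
      · have : ([a].isPrefixOf (c :: t)) = false := by
          simp [List.isPrefixOf]
          exact fun h' => hc h'.symm
        simp [PySem.Chars.replace.go, this, ih m _ ht, hc]

theorem replace_single (a b : Char) (l : List Char) :
    PySem.Chars.replace l [a] [b] = l.map (fun c => if c = a then b else c) := by
  simp [PySem.Chars.replace, replace_go_single a b l l.length [] le_rfl]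

-- A's composed three single-character maps, pointwise, equal B's if/elif chain
theorem three_maps_eq (c : Char) :
    (if (if (if c = 'X' then 'O' else c) = 'B' then 'D' else (if c = 'X' then 'O' else c)) = 'Z'
      then 'E'
      else (if (if c = 'X' then 'O' else c) = 'B' then 'D' else (if c = 'X' then 'O' else c)))
    = (if c = 'X' then 'O' else if c = 'B' then 'D' else if c = 'Z' then 'E' else c) := by
  split_ifs <;> simp_all

-- B's accumulator loop is a map
theorem foldl_branch_eq_map (l : List Char) (acc : List Char) :
    l.foldl
      (fun acc c =>
        if c = 'X' then acc ++ ['O']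
        else if c = 'B' then acc ++ ['D']
        else if c = 'Z' then acc ++ ['E']
        else acc ++ [c]) acc
    = acc ++ l.map (fun c => if c = 'X' then 'O' else if c = 'B' then 'D' else if c = 'Z' then 'E' else c) := by
  induction l generalizing acc with
  | nil => simp
  | cons c t ih =>
    simp only [List.foldl_cons, List.map_cons]
    by_cases h1 : c = 'X'
    · rw [ih]; simp [h1]
    · by_cases h2 : c = 'B'
      · rw [ih]; simp [h2]
      · by_cases h3 : c = 'Z'
        · rw [ih]; simp [h3]
        · rw [ih]; simp [h1, h2, h3]

-- ===== VERDICT (by name: the statement is the Claim_ definition above) =====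
theorem fix_ambiguous_aa_spec : Claim_equal_fix_ambiguous_aa := by
  intro seq add_stop _
  unfold Spec_fix_ambiguous_aa
  apply String.toList_inj.mp
  show (fix_ambiguous_aa seq add_stop).toList = (fix_ambiguous_aa_alt seq add_stop).toList
  have hA : fix_ambiguous_aa seq add_stop =
      PySem.Str.replace (PySem.Str.replace (PySem.Str.replace
        (PySem.Str.upper seq ++ "*") "X" "O") "B" "D") "Z" "E" := rfl
  rw [hA]
  unfold fix_ambiguous_aa_alt
  simp only [PySem.Str.toList_replace]
  rw [show ("X" : String).toList = ['X'] from rfl, show ("O" : String).toList = ['O'] from rfl,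
      show ("B" : String).toList = ['B'] from rfl, show ("D" : String).toList = ['D'] from rfl,
      show ("Z" : String).toList = ['Z'] from rfl, show ("E" : String).toList = ['E'] from rfl]
  rw [replace_single, replace_single, replace_single]
  rw [List.map_map, List.map_map]
  rw [foldl_branch_eq_map]
  simp only [String.toList_ofList, List.nil_append]
  have hsplit : (PySem.Str.upper seq ++ "*").toList = (PySem.Str.upper seq).toList ++ ['*'] := by
    simp
  rw [hsplit, List.map_append]
  congr 1
  apply List.map_congr_left
  intro c _
  simpa using three_maps_eq c
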